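-- pv_equiv track=rewrite | github.com/pypi-data/pypi-mirror-278 | packages/searchlogit/searchlogit-0.3.67-py3-none-any.whl/searchlogit/search.py | sort_HM
-- ===== SOURCE A (Python) =====
-- def sort_HM(fronts, v_dis, HM):
--     """Sorts solutions from best to worst based on Pareto front and crowding distance.
--     Parameters
--     ----------
--     Fronts : dict
--         Dict with keys indicating Pareto rank and values indicating the
--         indices of solutions in that rank.
--     v_dis : dict
--         Dict with keys indicating the index of solutions in memory and
--         value indicating crowding distance.
--     HM : list
--         List of solutions.
--
--     Returns
--     -------
--     Sorted_HM : list
--         Sorted list of solutions from best to worst.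
--     """
--     sorted_HM_id = []
--     for k, v in fronts.items():
--         pareto_sols = {key: val for key, val in v_dis.items()
--                        if key in fronts.get(k)}
--         sorted_HM_id.extend([ke for ke, va in
--                              sorted(pareto_sols.items(),
--                                     key=lambda item: item[1])])
--
--     sorted_HM = [HM[x] for x in sorted_HM_id]
--     return sorted_HM
-- ===== SOURCE B (Python) =====
-- def sort_HM(fronts, v_dis, HM):
--     """Single global sort: rank each solution by its front's position once,
--     then sort all ranked v_dis keys by (rank, crowding distance) in one pass."""
--     rank = {}
--     for pos, members in enumerate(fronts.values()):
--         for s in members: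
--             rank[s] = pos
--     ids = [k for k in v_dis if k in rank]
--     ids.sort(key=lambda k: (rank[k], v_dis[k]))
--     return [HM[x] for x in ids]
-- ===== Notes on version B (the rewrite author's own statement) =====
-- stated objective: faster
-- what changed: Instead of scanning all of v_dis once per front and stable-sorting each front's block separately, B builds a solution->front-position rank map once and does a single stable sort of all ranked v_dis keys by (rank, crowding distance).
-- outside the precondition, e.g. on sort_HM({0: [0], 1: [0]}, {0: 5}, [7]): A returns [7, 7], B returns [7]
import Mathlib
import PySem

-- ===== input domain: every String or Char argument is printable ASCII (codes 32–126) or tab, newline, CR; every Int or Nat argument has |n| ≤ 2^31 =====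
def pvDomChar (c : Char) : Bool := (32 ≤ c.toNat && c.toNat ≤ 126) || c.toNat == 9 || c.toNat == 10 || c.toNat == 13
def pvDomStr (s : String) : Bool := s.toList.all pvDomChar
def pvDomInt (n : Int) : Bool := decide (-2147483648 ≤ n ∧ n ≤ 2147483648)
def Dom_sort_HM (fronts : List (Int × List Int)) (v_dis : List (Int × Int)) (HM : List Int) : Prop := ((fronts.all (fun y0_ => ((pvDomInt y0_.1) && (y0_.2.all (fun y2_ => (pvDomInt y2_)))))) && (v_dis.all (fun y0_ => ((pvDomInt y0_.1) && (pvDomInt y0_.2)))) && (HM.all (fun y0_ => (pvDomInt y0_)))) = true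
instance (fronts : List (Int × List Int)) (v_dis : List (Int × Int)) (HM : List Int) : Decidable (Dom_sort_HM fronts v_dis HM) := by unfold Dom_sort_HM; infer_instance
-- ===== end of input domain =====

-- B replaces A's per-front scan of v_dis + per-front stable sort by one rank map and a single
-- stable sort of all ranked v_dis keys by (rank, crowding distance); proved equal on Pre_.


-- ===== PORT A =====
-- Literal port of A: for each front, a dict comprehension filtering all of v_dis by membership
-- in fronts.get(k), stable-sorted by value; 'HM[x]' is pyGet? (getD-default unreachable under Pre_).
def sort_HM (fronts : List (Int × List Int)) (v_dis : List (Int × Int)) (HM : List Int) : List Int :=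
  let sorted_HM_id : List Int :=
    fronts.foldl (fun acc kv =>
      let pareto_sols : PySem.Dict Int Int :=
        v_dis.foldl (fun d p =>
          if (((PySem.Dict.mk fronts).get? kv.1).getD []).contains p.1 then d.insert p.1 p.2
          else d) PySem.Dict.empty
      acc ++ (PySem.List.sorted pareto_sols.items (fun item => item.2) false).map Prod.fst) []
  sorted_HM_id.map (fun x => (PySem.List.pyGet? HM x).getD 0)

-- ===== PORT B =====
-- Literal port of B: build the rank dict once (later fronts overwrite), keep the ranked v_dis
-- keys, one stable sort by the tuple (rank[k], v_dis[k]); getD-defaults are unreachable.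
def sort_HM_alt (fronts : List (Int × List Int)) (v_dis : List (Int × Int)) (HM : List Int) : List Int :=
  let rank : PySem.Dict Int Int :=
    (PySem.List.enumerate (fronts.map Prod.snd) 0).foldl
      (fun d pm => pm.2.foldl (fun d s => d.insert s pm.1) d) PySem.Dict.empty
  let ids : List Int := (v_dis.map Prod.fst).filter (fun k => rank.contains k)
  let vd : PySem.Dict Int Int := PySem.Dict.mk v_dis
  let sortedIds : List Int :=
    PySem.List.sorted2 ids (fun k => rank.getD k 0) (fun k => vd.getD k 0) false
  sortedIds.map (fun x => (PySem.List.pyGet? HM x).getD 0)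

-- ===== PRECONDITION & SPEC =====
-- Pre_ excludes (a) assoc lists with duplicate keys, which do not represent a Python dict;
-- (b) inputs where some v_dis key lies in two different fronts — there A's value (the key is
-- emitted once per front) and B's (once) are both defensible, as Pareto fronts are disjoint by
-- design; (c) inputs where a sorted id is out of range for HM, where A raises IndexError.
def Pre_sort_HM (fronts : List (Int × List Int)) (v_dis : List (Int × Int)) (HM : List Int) : Prop :=
  (fronts.map Prod.fst).Nodup ∧ (v_dis.map Prod.fst).Nodup ∧
  List.Pairwise (fun f g => ∀ p ∈ v_dis, ¬(p.1 ∈ f.2 ∧ p.1 ∈ g.2)) fronts ∧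
  ∀ p ∈ v_dis, (∃ f ∈ fronts, p.1 ∈ f.2) → PySem.Raise.InRange HM.length p.1
instance (fronts : List (Int × List Int)) (v_dis : List (Int × Int)) (HM : List Int) : Decidable (Pre_sort_HM fronts v_dis HM) := by unfold Pre_sort_HM; infer_instance

def pvWitness_sort_HM : (List (Int × List Int)) × (List (Int × Int)) × List Int :=
  ([(0, [1, 2]), (1, [0])], [(0, 3), (1, 1), (2, 1)], [10, 20, 30])

def Spec_sort_HM (fronts : List (Int × List Int)) (v_dis : List (Int × Int)) (HM : List Int) (out : List Int) : Prop := out = sort_HM_alt fronts v_dis HM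
instance (fronts : List (Int × List Int)) (v_dis : List (Int × Int)) (HM : List Int) (out : List Int) : Decidable (Spec_sort_HM fronts v_dis HM out) := by unfold Spec_sort_HM; infer_instance

-- ===== CLAIM (what is proved, stated in full; the proofs are below) =====
def Claim_equal_sort_HM : Prop := ∀ (fronts : List (Int × List Int)) (v_dis : List (Int × Int)) (HM : List Int), Dom_sort_HM fronts v_dis HM → Pre_sort_HM fronts v_dis HM → Spec_sort_HM fronts v_dis HM (sort_HM fronts v_dis HM)

-- ===== LEMMAS AND PROOFS =====

-- insertion sort as a plain foldl (= PySem.List.sorted/sorted2 with reverse := false)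
def pvS {α : Type} (b : α → α → Bool) (xs : List α) : List α :=
  xs.foldl (fun acc x => PySem.List.insertBy b x acc) []

-- which fronts contain k / position (from s) of the first front containing k
def pvMemF (fronts : List (Int × List Int)) (k : Int) : Bool :=
  fronts.any (fun f => decide (k ∈ f.2))
def pvRk (fronts : List (Int × List Int)) (s : Int) (k : Int) : Int :=
  match fronts with
  | [] => 0
  | f :: t => if k ∈ f.2 then s else pvRk t (s + 1) k
-- last front position recorded for k by B's rank-building loop
def pvLastR (L : List (Int × List Int)) (k : Int) : Option Int :=
  match L with
  | [] => none
  | pm :: t => match pvLastR t k with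
    | some r => some r
    | none => if k ∈ pm.2 then some pm.1 else none

-- the comparison functions of B's tuple sort and A's per-front sort, on v_dis pairs
def pvBP (fronts : List (Int × List Int)) (s : Int) (p q : Int × Int) : Bool :=
  decide (pvRk fronts s p.1 < pvRk fronts s q.1) ||
    (!decide (pvRk fronts s q.1 < pvRk fronts s p.1) && decide (p.2 < q.2))
def pvBsnd (p q : Int × Int) : Bool := decide (p.2 < q.2)

theorem pvS_append_singleton {α : Type} (b : α → α → Bool) (xs : List α) (x : α) :
    pvS b (xs ++ [x]) = PySem.List.insertBy b x (pvS b xs) := by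
  simp [pvS, List.foldl_append]

theorem pvS_mem {α : Type} (b : α → α → Bool) (xs : List α) (y : α) :
    y ∈ pvS b xs ↔ y ∈ xs := by
  induction xs using List.reverseRecOn with
  | nil => simp [pvS]
  | append_singleton xs x ih =>
      rw [pvS_append_singleton]
      simp [PySem.List.insertBy_mem_iff, ih]
      tauto

theorem pvInsertBy_congr {α : Type} (b₁ b₂ : α → α → Bool) (x : α) (l : List α)
    (h : ∀ y ∈ l, b₁ x y = b₂ x y) :
    PySem.List.insertBy b₁ x l = PySem.List.insertBy b₂ x l := by
  induction l with
  | nil => rfl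
  | cons y ys ih =>
      simp only [PySem.List.insertBy]
      rw [h y (by simp)]
      split
      · rfl
      · rw [ih (fun z hz => h z (by simp [hz]))]

theorem pvInsertBy_append_left {α : Type} (b : α → α → Bool) (x : α) (l₁ l₂ : List α)
    (h : ∀ y ∈ l₂, b x y = true) :
    PySem.List.insertBy b x (l₁ ++ l₂) = PySem.List.insertBy b x l₁ ++ l₂ := by
  induction l₁ with
  | nil =>
      cases l₂ with
      | nil => rfl
      | cons y ys => simp [PySem.List.insertBy, h y (by simp)]
  | cons z zs ih =>
      simp only [List.cons_append, PySem.List.insertBy]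
      split
      · rfl
      · simp [ih]

theorem pvInsertBy_append_right {α : Type} (b : α → α → Bool) (x : α) (l₁ l₂ : List α)
    (h : ∀ y ∈ l₁, b x y = false) :
    PySem.List.insertBy b x (l₁ ++ l₂) = l₁ ++ PySem.List.insertBy b x l₂ := by
  induction l₁ with
  | nil => rfl
  | cons z zs ih =>
      simp only [List.cons_append, PySem.List.insertBy, h z (by simp)]
      simp [ih (fun y hy => h y (by simp [hy]))]

theorem pvInsertBy_map {α β : Type} (b : β → β → Bool) (f : α → β) (x : α) (l : List α) :
    PySem.List.insertBy b (f x) (l.map f) =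
      (PySem.List.insertBy (fun a c => b (f a) (f c)) x l).map f := by
  induction l with
  | nil => rfl
  | cons y ys ih =>
      simp only [List.map_cons, PySem.List.insertBy]
      split
      · simp
      · simp [ih]

theorem pvS_congr {α : Type} (b₁ b₂ : α → α → Bool) (xs : List α)
    (h : ∀ x ∈ xs, ∀ y ∈ xs, b₁ x y = b₂ x y) : pvS b₁ xs = pvS b₂ xs := by
  induction xs using List.reverseRecOn with
  | nil => rfl
  | append_singleton xs x ih =>
      rw [pvS_append_singleton, pvS_append_singleton,
        ih (fun a ha c hc => h a (by simp [ha]) c (by simp [hc]))]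
      exact pvInsertBy_congr _ _ _ _ (fun y hy => by
        have := (pvS_mem b₂ xs y).1 hy
        exact h x (by simp) y (by simp [this]))

theorem pvS_map {α β : Type} (b : β → β → Bool) (f : α → β) (xs : List α) :
    pvS b (xs.map f) = (pvS (fun a c => b (f a) (f c)) xs).map f := by
  induction xs using List.reverseRecOn with
  | nil => rfl
  | append_singleton xs x ih =>
      rw [List.map_append, List.map_singleton, pvS_append_singleton, pvS_append_singleton, ih,
        pvInsertBy_map]

theorem pvS_split {α : Type} (b : α → α → Bool) (p : α → Bool) (xs : List α)
    (h : ∀ x ∈ xs, ∀ y ∈ xs, p x = true → p y = false → b x y = true ∧ b y x = false) :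
    pvS b xs = pvS b (xs.filter p) ++ pvS b (xs.filter (fun x => !p x)) := by
  induction xs using List.reverseRecOn with
  | nil => rfl
  | append_singleton xs x ih =>
      have ih' := ih (fun a ha c hc => h a (by simp [ha]) c (by simp [hc]))
      rw [pvS_append_singleton, ih', List.filter_append, List.filter_append]
      by_cases hp : p x = true
      · rw [pvInsertBy_append_left b x _ _ (fun y hy => by
          have hy' := (pvS_mem b _ y).1 hy
          simp only [List.mem_filter] at hy'
          exact (h x (by simp) y (by simp [hy'.1]) hp (by simpa using hy'.2)).1)]
        simp [hp, pvS_append_singleton]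
      · rw [pvInsertBy_append_right b x _ _ (fun y hy => by
          have hy' := (pvS_mem b _ y).1 hy
          simp only [List.mem_filter] at hy'
          exact (h y (by simp [hy'.1]) x (by simp) hy'.2 (by simpa using hp)).2)]
        simp [hp, pvS_append_singleton]

-- ===== bridges from the ports' Dict operations to the pure functions =====

theorem pvMemF_cons (f : Int × List Int) (t : List (Int × List Int)) (k : Int) :
    pvMemF (f :: t) k = (decide (k ∈ f.2) || pvMemF t k) := by
  simp [pvMemF]

theorem pvGet_foldl_insert (l : List Int) (d : PySem.Dict Int Int) (v k : Int) :
    ((l.foldl (fun d s => d.insert s v) d).get? k) = if k ∈ l then some v else d.get? k := by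
  induction l generalizing d with
  | nil => simp
  | cons a t ih =>
      simp only [List.foldl_cons, ih, PySem.Dict.get?_insert]
      by_cases hk : k ∈ t
      · simp [hk]
      · by_cases hak : k = a
        · simp [hak]
        · simp [hk, hak]

theorem pvRank_get (L : List (Int × List Int)) (d : PySem.Dict Int Int) (k : Int) :
    ((L.foldl (fun d pm => pm.2.foldl (fun d s => d.insert s pm.1) d) d).get? k) =
      match pvLastR L k with
      | some r => some r
      | none => d.get? k := by
  induction L generalizing d with
  | nil => simp [pvLastR]
  | cons pm t ih =>
      simp only [List.foldl_cons, ih, pvLastR]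
      cases pvLastR t k with
      | some r => simp
      | none =>
          simp only [pvGet_foldl_insert]
          by_cases hk : k ∈ pm.2 <;> simp [hk]

theorem pvLastR_isSome (fronts : List (Int × List Int)) (s k : Int) :
    (pvLastR (PySem.List.enumerate (fronts.map Prod.snd) s) k).isSome = pvMemF fronts k := by
  induction fronts generalizing s with
  | nil => simp [pvLastR, pvMemF]
  | cons f t ih =>
      have ht := ih (s + 1)
      simp only [List.map_cons, PySem.List.enumerate_cons, pvLastR, pvMemF_cons]
      cases hl : pvLastR (PySem.List.enumerate (t.map Prod.snd) (s + 1)) k with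
      | some r =>
          rw [hl] at ht
          simp only [Option.isSome_some] at ht ⊢
          simp [← ht]
      | none =>
          rw [hl] at ht
          simp only [Option.isSome_none] at ht
          by_cases hf : k ∈ f.2 <;> simp [hf, ← ht]

theorem pvLastR_disjoint (fronts : List (Int × List Int)) (s k : Int)
    (hdis : List.Pairwise (fun f g => ¬(k ∈ f.2 ∧ k ∈ g.2)) fronts)
    (hmem : pvMemF fronts k = true) :
    pvLastR (PySem.List.enumerate (fronts.map Prod.snd) s) k = some (pvRk fronts s k) := by
  induction fronts generalizing s with
  | nil => simp [pvMemF] at hmem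
  | cons f t ih =>
      rcases List.pairwise_cons.1 hdis with ⟨hhead, htail⟩
      simp only [List.map_cons, PySem.List.enumerate_cons, pvLastR, pvRk]
      by_cases hf : k ∈ f.2
      · have hnot : pvMemF t k = false := by
          by_contra hc
          simp only [Bool.not_eq_false, pvMemF, List.any_eq_true, decide_eq_true_eq] at hc
          rcases hc with ⟨g, hg, hgk⟩
          exact hhead g hg ⟨hf, hgk⟩
        have hsome := pvLastR_isSome t (s + 1) k
        rw [hnot] at hsome
        cases hl : pvLastR (PySem.List.enumerate (t.map Prod.snd) (s + 1)) k with
        | some r => rw [hl] at hsome; simp at hsome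
        | none => simp [hf]
      · have hmemt : pvMemF t k = true := by
          rw [pvMemF_cons] at hmem
          simpa [hf] using hmem
        rw [ih (s + 1) htail hmemt]
        simp [hf]

-- first-match lookup in an assoc list with distinct keys
theorem pvFind_nodup {ν : Type} (l : List (Int × ν)) (p : Int × ν)
    (hnd : (l.map Prod.fst).Nodup) (hp : p ∈ l) :
    l.find? (fun q => q.1 == p.1) = some p := by
  induction l with
  | nil => simp at hp
  | cons q t ih =>
      simp only [List.map_cons, List.nodup_cons] at hnd
      rcases List.mem_cons.1 hp with rfl | hp'
      · exact List.find?_cons_of_pos (by simp)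
      · have hne : ¬(q.1 == p.1) = true := by
          simp only [beq_iff_eq]
          intro h
          exact hnd.1 (h ▸ List.mem_map_of_mem hp')
        have hne' : (q.1 == p.1) = false := by simpa using hne
        rw [List.find?_cons, hne']
        exact ih hnd.2 hp'

-- A's dict comprehension over v_dis with distinct keys is just a filter
theorem pvPareto_items (c : Int × Int → Bool) (l : List (Int × Int)) (d : PySem.Dict Int Int)
    (hnd : (l.map Prod.fst).Nodup) (hd : ∀ p ∈ l, d.contains p.1 = false) :
    (l.foldl (fun d p => if c p then d.insert p.1 p.2 else d) d).items
      = d.items ++ l.filter c := by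
  induction l generalizing d with
  | nil => simp
  | cons p t ih =>
      simp only [List.map_cons, List.nodup_cons] at hnd
      simp only [List.foldl_cons]
      by_cases hc : c p = true
      · have hdp : d.contains p.1 = false := hd p (by simp)
        have hins : (d.insert p.1 p.2).items = d.items ++ [p] := by
          simp [PySem.Dict.insert, hdp]
        have hstep : ∀ q ∈ t, (d.insert p.1 p.2).contains q.1 = false := by
          intro q hq
          have hq1 : q.1 ≠ p.1 := by
            intro h
            exact hnd.1 (h ▸ List.mem_map_of_mem hq)
          have hqd : d.contains q.1 = false := hd q (by simp [hq])
          simp only [PySem.Dict.contains] at hqd ⊢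
          rw [hins]
          simp only [List.any_append, List.any_cons, List.any_nil, hqd]
          simp
          omega
        rw [if_pos hc, ih (d.insert p.1 p.2) hnd.2 hstep, hins]
        simp [hc]
      · rw [if_neg hc, ih d hnd.2 (fun q hq => hd q (by simp [hq]))]
        simp [hc]

theorem pvRk_ge (t : List (Int × List Int)) (s k : Int) (h : pvMemF t k = true) :
    s ≤ pvRk t s k := by
  induction t generalizing s with
  | nil => simp [pvMemF] at h
  | cons f t ih =>
      by_cases hf : k ∈ f.2
      · simp [pvRk, hf]
      · have ht : pvMemF t k = true := by
          rw [pvMemF_cons] at h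
          simpa [hf] using h
        have := ih (s + 1) ht
        simp only [pvRk, hf, if_false]
        omega

-- ===== the main pure lemma: one global tuple sort = concatenation of per-front sorts =====
theorem pvMain (v_dis : List (Int × Int)) (fronts : List (Int × List Int)) (s : Int)
    (hdis : List.Pairwise (fun f g => ∀ p ∈ v_dis, ¬(p.1 ∈ f.2 ∧ p.1 ∈ g.2)) fronts) :
    pvS (pvBP fronts s) (v_dis.filter (fun p => pvMemF fronts p.1)) =
      fronts.flatMap (fun kv => pvS pvBsnd (v_dis.filter (fun p => decide (p.1 ∈ kv.2)))) := by
  induction fronts generalizing s with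
  | nil => simp [pvMemF, pvS]
  | cons f t ih =>
      rcases List.pairwise_cons.1 hdis with ⟨hhead, htail⟩
      -- keys in f are in no front of t
      have hft : ∀ p ∈ v_dis, p.1 ∈ f.2 → pvMemF t p.1 = false := by
        intro p hp hpf
        by_contra hc
        simp only [Bool.not_eq_false, pvMemF, List.any_eq_true, decide_eq_true_eq] at hc
        rcases hc with ⟨g, hg, hgk⟩
        exact hhead g hg p hp ⟨hpf, hgk⟩
      have htf : ∀ p ∈ v_dis, pvMemF t p.1 = true → p.1 ∉ f.2 := by
        intro p hp hpt hpf
        have := hft p hp hpf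
        rw [this] at hpt
        exact absurd hpt (by simp)
      -- split the global sort at membership in f
      rw [pvS_split (pvBP (f :: t) s) (fun p => decide (p.1 ∈ f.2)) _ (by
        intro x hx y hy hxp hyp
        simp only [List.mem_filter] at hx hy
        have hxf : x.1 ∈ f.2 := by simpa using hxp
        have hyf : y.1 ∉ f.2 := by simpa using hyp
        have hymem : pvMemF t y.1 = true := by
          have h2 := hy.2
          rw [pvMemF_cons] at h2
          simpa [hyf] using h2
        have hrx : pvRk (f :: t) s x.1 = s := by simp [pvRk, hxf]
        have hry : s + 1 ≤ pvRk (f :: t) s y.1 := by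
          simp only [pvRk, hyf, if_false]
          exact pvRk_ge t (s + 1) y.1 hymem
        constructor
        · simp only [pvBP, hrx]
          simp [show s < pvRk (f :: t) s y.1 by omega]
        · simp only [pvBP, hrx]
          simp [show ¬(pvRk (f :: t) s y.1 < s) by omega, show s < pvRk (f :: t) s y.1 by omega])]
      -- the first chunk is exactly f's block
      have hch1 : (v_dis.filter (fun p => pvMemF (f :: t) p.1)).filter (fun p => decide (p.1 ∈ f.2))
          = v_dis.filter (fun p => decide (p.1 ∈ f.2)) := by
        rw [List.filter_filter]
        refine List.filter_congr ?_
        intro p hp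
        by_cases hpf : p.1 ∈ f.2
        · simp [hpf, pvMemF_cons]
        · simp [hpf]
      have hblk1 : pvS (pvBP (f :: t) s) (v_dis.filter (fun p => decide (p.1 ∈ f.2)))
          = pvS pvBsnd (v_dis.filter (fun p => decide (p.1 ∈ f.2))) := by
        refine pvS_congr _ _ _ ?_
        intro x hx y hy
        simp only [List.mem_filter, decide_eq_true_eq] at hx hy
        have hrx : pvRk (f :: t) s x.1 = s := by simp [pvRk, hx.2]
        have hry : pvRk (f :: t) s y.1 = s := by simp [pvRk, hy.2]
        simp [pvBP, pvBsnd, hrx, hry]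
      -- the second chunk is the rest of the fronts
      have hch2 : (v_dis.filter (fun p => pvMemF (f :: t) p.1)).filter (fun p => !decide (p.1 ∈ f.2))
          = v_dis.filter (fun p => pvMemF t p.1) := by
        rw [List.filter_filter]
        refine List.filter_congr ?_
        intro p hp
        by_cases hpf : p.1 ∈ f.2
        · simp [hpf, hft p hp hpf]
        · simp [hpf, pvMemF_cons]
      have hblk2 : pvS (pvBP (f :: t) s) (v_dis.filter (fun p => pvMemF t p.1))
          = pvS (pvBP t (s + 1)) (v_dis.filter (fun p => pvMemF t p.1)) := by
        refine pvS_congr _ _ _ ?_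
        intro x hx y hy
        simp only [List.mem_filter] at hx hy
        have hxf : x.1 ∉ f.2 := htf x hx.1 hx.2
        have hyf : y.1 ∉ f.2 := htf y hy.1 hy.2
        have hrx : pvRk (f :: t) s x.1 = pvRk t (s + 1) x.1 := by simp [pvRk, hxf]
        have hry : pvRk (f :: t) s y.1 = pvRk t (s + 1) y.1 := by simp [pvRk, hyf]
        simp [pvBP, hrx, hry]
      rw [hch1, hblk1, hch2, hblk2, ih (s + 1) htail, List.flatMap_cons]

-- ===== assembling the ports =====

theorem pvSorted2_eq (xs : List Int) (k1 k2 : Int → Int) :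
    PySem.List.sorted2 xs k1 k2 false =
      pvS (fun a b => decide (k1 a < k1 b) || (!decide (k1 b < k1 a) && decide (k2 a < k2 b))) xs := rfl

theorem pvSorted_eq (xs : List (Int × Int)) :
    PySem.List.sorted xs (fun p => p.2) false = pvS pvBsnd xs := rfl

theorem pvFoldl_append_flatMap {α β : Type} (g g' : α → List β) (xs : List α) (acc : List β)
    (h : ∀ x ∈ xs, g x = g' x) :
    xs.foldl (fun acc x => acc ++ g x) acc = acc ++ xs.flatMap g' := by
  induction xs generalizing acc with
  | nil => simp
  | cons x t ih =>
      simp only [List.foldl_cons, List.flatMap_cons]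
      rw [ih (acc ++ g x) (fun y hy => h y (by simp [hy])), h x (by simp), List.append_assoc]

theorem pvA_eq (fronts : List (Int × List Int)) (v_dis : List (Int × Int)) (HM : List Int)
    (hnd1 : (fronts.map Prod.fst).Nodup) (hnd2 : (v_dis.map Prod.fst).Nodup) :
    sort_HM fronts v_dis HM =
      (fronts.flatMap (fun kv =>
        (pvS pvBsnd (v_dis.filter (fun p => decide (p.1 ∈ kv.2)))).map Prod.fst)).map
        (fun x => (PySem.List.pyGet? HM x).getD 0) := by
  simp only [sort_HM]
  congr 1
  refine pvFoldl_append_flatMap _ _ _ _ ?_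
  intro kv hkv
  have hget : (PySem.Dict.mk fronts).get? kv.1 = some kv.2 := by
    show ((fronts.find? (fun q => q.1 == kv.1)).map (fun x => x.2)) = some kv.2
    rw [pvFind_nodup fronts kv hnd1 hkv]
    rfl
  have hitems : (v_dis.foldl (fun d p =>
        if (((PySem.Dict.mk fronts).get? kv.1).getD []).contains p.1 then d.insert p.1 p.2
        else d) PySem.Dict.empty).items
      = v_dis.filter (fun p => decide (p.1 ∈ kv.2)) := by
    have hpar := pvPareto_items (fun p => (((PySem.Dict.mk fronts).get? kv.1).getD []).contains p.1)
      v_dis PySem.Dict.empty hnd2 (fun p _ => by simp [PySem.Dict.contains, PySem.Dict.empty])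
    rw [hpar]
    simp only [PySem.Dict.empty, List.nil_append]
    refine List.filter_congr ?_
    intro p _
    rw [hget]
    simp
  rw [hitems, pvSorted_eq]

theorem pvRank_contains (fronts : List (Int × List Int)) (k : Int) :
    ((PySem.List.enumerate (fronts.map Prod.snd) 0).foldl
        (fun d pm => pm.2.foldl (fun d s => d.insert s pm.1) d) PySem.Dict.empty).contains k
      = pvMemF fronts k := by
  rw [PySem.Dict.contains_eq_isSome_get?, pvRank_get]
  rw [← pvLastR_isSome fronts 0 k]
  cases pvLastR (PySem.List.enumerate (fronts.map Prod.snd) 0) k with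
  | some r => simp
  | none => simp [PySem.Dict.empty, PySem.Dict.get?]

theorem pvRank_getD (fronts : List (Int × List Int)) (k : Int)
    (hdis : List.Pairwise (fun f g => ¬(k ∈ f.2 ∧ k ∈ g.2)) fronts)
    (hmem : pvMemF fronts k = true) :
    ((PySem.List.enumerate (fronts.map Prod.snd) 0).foldl
        (fun d pm => pm.2.foldl (fun d s => d.insert s pm.1) d) PySem.Dict.empty).getD k 0
      = pvRk fronts 0 k := by
  unfold PySem.Dict.getD
  rw [pvRank_get, pvLastR_disjoint fronts 0 k hdis hmem]
  rfl

theorem pvVd_getD (v_dis : List (Int × Int)) (p : Int × Int)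
    (hnd : (v_dis.map Prod.fst).Nodup) (hp : p ∈ v_dis) :
    (PySem.Dict.mk v_dis).getD p.1 0 = p.2 := by
  unfold PySem.Dict.getD
  show (((v_dis.find? (fun q => q.1 == p.1)).map (fun x => x.2)).getD 0) = p.2
  rw [pvFind_nodup v_dis p hnd hp]
  rfl

theorem pvB_eq (fronts : List (Int × List Int)) (v_dis : List (Int × Int)) (HM : List Int)
    (hnd2 : (v_dis.map Prod.fst).Nodup)
    (hdis : List.Pairwise (fun f g => ∀ p ∈ v_dis, ¬(p.1 ∈ f.2 ∧ p.1 ∈ g.2)) fronts) :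
    sort_HM_alt fronts v_dis HM =
      ((pvS (pvBP fronts 0) (v_dis.filter (fun p => pvMemF fronts p.1))).map
        Prod.fst).map (fun x => (PySem.List.pyGet? HM x).getD 0) := by
  have h0 : sort_HM_alt fronts v_dis HM =
      (PySem.List.sorted2
        ((v_dis.map Prod.fst).filter (fun k =>
          ((PySem.List.enumerate (fronts.map Prod.snd) 0).foldl
            (fun d pm => pm.2.foldl (fun d s => d.insert s pm.1) d) PySem.Dict.empty).contains k))
        (fun k => ((PySem.List.enumerate (fronts.map Prod.snd) 0).foldl
            (fun d pm => pm.2.foldl (fun d s => d.insert s pm.1) d) PySem.Dict.empty).getD k 0)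
        (fun k => (PySem.Dict.mk v_dis).getD k 0) false).map
        (fun x => (PySem.List.pyGet? HM x).getD 0) := rfl
  rw [h0, pvSorted2_eq]
  congr 1
  have hids : (v_dis.map Prod.fst).filter (fun k =>
        ((PySem.List.enumerate (fronts.map Prod.snd) 0).foldl
          (fun d pm => pm.2.foldl (fun d s => d.insert s pm.1) d) PySem.Dict.empty).contains k)
      = (v_dis.filter (fun p => pvMemF fronts p.1)).map Prod.fst := by
    rw [List.filter_map]
    congr 1
    refine List.filter_congr ?_
    intro p _
    simp only [Function.comp]
    rw [pvRank_contains]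
  rw [hids, pvS_map]
  congr 1
  refine pvS_congr _ _ _ ?_
  intro x hx y hy
  simp only [List.mem_filter] at hx hy
  have hdx : List.Pairwise (fun f g => ¬(x.1 ∈ f.2 ∧ x.1 ∈ g.2)) fronts :=
    hdis.imp (fun h => h x hx.1)
  have hdy : List.Pairwise (fun f g => ¬(y.1 ∈ f.2 ∧ y.1 ∈ g.2)) fronts :=
    hdis.imp (fun h => h y hy.1)
  rw [pvRank_getD fronts x.1 hdx hx.2, pvRank_getD fronts y.1 hdy hy.2,
    pvVd_getD v_dis x hnd2 hx.1, pvVd_getD v_dis y hnd2 hy.1]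
  rfl

-- ===== VERDICT (by name: the statement is the Claim_ definition above) =====
theorem sort_HM_spec : Claim_equal_sort_HM := by
  intro fronts v_dis HM _ hpre
  obtain ⟨hnd1, hnd2, hdis, -⟩ := hpre
  unfold Spec_sort_HM
  rw [pvA_eq fronts v_dis HM hnd1 hnd2, pvB_eq fronts v_dis HM hnd2 hdis,
    pvMain v_dis fronts 0 hdis]
  simp only [List.map_flatMap]
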